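-- pv_equiv track=rewrite | github.com/Lightblues/Leetcode | contest/301-350/317.py | makeIntegerBeautiful
-- ===== SOURCE A (Python) =====
-- def makeIntegerBeautiful(n: int, target: int) -> int:
--     # 方便期间转为 list
--     digits = list(map(int, str(n)))
--     ans = []
--     idx = len(digits)-1 # 当前考察的位
--     while idx>=0:
--         # 检查是否满足条件
--         if sum(digits) <= target: break
--         #
--         if digits[idx]!=0:
--             ans.append(10-digits[idx])
--             # 注意, 可能有连续进位
--             i = idx-1
--             while  i>0 and digits[i]==9:
--                 digits[i]=0; i-=1
--             # 因为题目保证了总有答案, 不考虑最高位进位 (分数变为 1)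
--             if i>=0 : digits[i] += 1
--         else:
--             ans.append(0)
--         # 加上增量之后, 将这一位置0
--         digits[idx] = 0
--         idx -= 1
--     if len(ans)==0: return 0
--     return int("".join(reversed(list(map(str, ans)))))
-- ===== SOURCE B (Python) =====
-- def makeIntegerBeautiful(n: int, target: int) -> int:
--     # Round n up to a multiple of a growing power of ten until the digit sum fits.
--     cur = n
--     power = 1
--     for _ in range(len(str(n)) + 1):
--         if sum(map(int, str(cur))) <= target:
--             break
--         cur = -(-cur // 10)  # ceiling division by 10
--         power *= 10
--     return cur * power - n
-- ===== Notes on version B (the rewrite author's own statement) =====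
-- stated objective: simpler
-- what changed: replaces A's digit-array bookkeeping (explicit carry loop over a digit list plus a per-position increment list that is finally stringified and re-parsed) by plain integer rounding: repeatedly ceiling-divide the current value by 10 (tracking the power of ten) until its digit sum fits, then return cur*power - n
-- outside the precondition, e.g. on makeIntegerBeautiful(5, 0): A returns 5, B returns 95
import Mathlib
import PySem

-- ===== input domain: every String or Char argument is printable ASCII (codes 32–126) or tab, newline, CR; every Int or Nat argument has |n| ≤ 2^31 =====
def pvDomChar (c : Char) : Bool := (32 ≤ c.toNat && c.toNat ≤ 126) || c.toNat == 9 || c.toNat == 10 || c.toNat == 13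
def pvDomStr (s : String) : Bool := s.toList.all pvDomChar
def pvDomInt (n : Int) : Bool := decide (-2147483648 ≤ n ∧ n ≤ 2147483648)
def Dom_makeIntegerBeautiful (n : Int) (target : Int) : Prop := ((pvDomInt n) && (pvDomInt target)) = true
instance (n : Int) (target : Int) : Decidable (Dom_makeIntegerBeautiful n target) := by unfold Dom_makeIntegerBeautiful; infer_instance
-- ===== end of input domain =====

-- B replaces A's digit-array/carry bookkeeping by plain integer rounding (ceiling division by 10); objective: simpler, same cost.

-- ===== PORT A =====

-- int(c) for a single character c
def pvIntOfChar (c : Char) : Int := (PySem.Int.ofChars? [c]).getD 0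

-- digits = list(map(int, str(n)))
def pvDigitsA (n : Int) : List Int := (PySem.Int.toChars n).map pvIntOfChar

-- the inner carry loop: while i>0 and digits[i]==9: digits[i]=0; i-=1
def pvCarry (ds : List Int) (i : Int) : List Int × Int :=
  if h : 0 < i ∧ PySem.List.pyGetD ds i 0 = 9 then
    pvCarry (PySem.List.pySetD ds i 0) (i - 1)
  else (ds, i)
termination_by i.toNat
decreasing_by omega

-- the outer while loop over idx (fuel = idx+1)
def pvLoopA (target : Int) : Nat → List Int → List Int → List Int × List Int
  | 0, ds, ans => (ds, ans)
  | idx+1, ds, ans =>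
    if ds.sum ≤ target then (ds, ans)
    else if PySem.List.pyGetD ds (idx : Int) 0 ≠ 0 then
      let ans' := ans ++ [10 - PySem.List.pyGetD ds (idx : Int) 0]
      let p := pvCarry ds ((idx : Int) - 1)
      let ds' := if 0 ≤ p.2 then PySem.List.pySetD p.1 p.2 (PySem.List.pyGetD p.1 p.2 0 + 1) else p.1
      pvLoopA target idx (PySem.List.pySetD ds' (idx : Int) 0) ans'
    else
      pvLoopA target idx (PySem.List.pySetD ds (idx : Int) 0) (ans ++ [0])

-- int("...") on the joined string: ported by hand as a fold over the digit characters;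
-- exact because under Pre_ the joined string is a nonempty sequence of ASCII digit characters
def pvIntOfDigits (cs : List Char) : Int := cs.foldl (fun a c => a * 10 + pvIntOfChar c) 0

def makeIntegerBeautiful (n : Int) (target : Int) : Int :=
  let digits := pvDigitsA n
  let r := pvLoopA target digits.length digits []
  if r.2.length = 0 then 0
  else pvIntOfDigits (PySem.Chars.join [] ((r.2.map PySem.Int.toChars).reverse))

-- ===== PORT B =====

-- sum(map(int, str(cur)))
def pvDigitSum (m : Int) : Int := ((PySem.Int.toChars m).map pvIntOfChar).sum

-- the bounded rounding loop of B
def pvLoopB (target : Int) : Nat → Int → Int → Int × Int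
  | 0, cur, power => (cur, power)
  | k+1, cur, power =>
    if pvDigitSum cur ≤ target then (cur, power)
    else pvLoopB target k (-(PySem.Int.floordiv (-cur) 10)) (power * 10)

def makeIntegerBeautiful_alt (n : Int) (target : Int) : Int :=
  let r := pvLoopB target ((PySem.Int.toChars n).length + 1) n 1
  r.1 * r.2 - n

-- ===== PRECONDITION & SPEC =====
-- Pre_ excludes negative n, on which both programs raise ValueError (int('-')), and target ≤ 0
-- (outside the problem's constraint 1 ≤ target), where no beautiful number exists and the value
-- A happens to return (e.g. 5 on (5,0), not beautiful) is meaningless.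
def Pre_makeIntegerBeautiful (n : Int) (target : Int) : Prop := 0 ≤ n ∧ 1 ≤ target
instance (n : Int) (target : Int) : Decidable (Pre_makeIntegerBeautiful n target) := by
  unfold Pre_makeIntegerBeautiful; infer_instance

def pvWitness_makeIntegerBeautiful : Int × Int := (467, 6)

def Spec_makeIntegerBeautiful (n : Int) (target : Int) (out : Int) : Prop := out = makeIntegerBeautiful_alt n target
instance (n : Int) (target : Int) (out : Int) : Decidable (Spec_makeIntegerBeautiful n target out) := by unfold Spec_makeIntegerBeautiful; infer_instance

-- ===== CLAIM (what is proved, stated in full; the proofs are below) =====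
def Claim_equal_makeIntegerBeautiful : Prop := ∀ (n : Int) (target : Int), Dom_makeIntegerBeautiful n target → Pre_makeIntegerBeautiful n target → Spec_makeIntegerBeautiful n target (makeIntegerBeautiful n target)


-- ===== LEMMAS AND PROOFS =====

-- ---- proof-side arithmetic companions ----

/-- digit sum of a natural number -/
def pvSNat (u : Nat) : Nat := (Nat.digits 10 u).sum

/-- ceiling division by 10 on Nat -/
def pvCeilN (u : Nat) : Nat := u / 10 + (if u % 10 = 0 then 0 else 1)

/-- the digit A appends at the current position -/
def pvADig (u : Nat) : Nat := (10 - u % 10) % 10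

/-- big-endian digit list of the current prefix value (head may be 10 after a top carry) -/
def pvRepD (u m : Nat) : List Int :=
  if u = 10 ^ m then (10 : Int) :: List.replicate (m - 1) 0
  else (Nat.digits 10 u).reverse.map (fun d => Int.ofNat d)

/-- the sum of the entries of `pvRepD u m` -/
def pvLsumA (u m : Nat) : Int := if u = 10 ^ m then 10 else (pvSNat u : Int)

/-- the digits A's loop appends, in append order -/
def pvTailA (target : Int) : Nat → Nat → List Int
  | 0, _ => []
  | m + 1, u =>
    if pvLsumA u (m + 1) ≤ target then []
    else (pvADig u : Int) :: pvTailA target m (pvCeilN u)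

/-- B's stopping value `cur * 10^k` computed arithmetically -/
def pvMstop (target : Int) : Nat → Nat → Nat
  | 0, u => u
  | f + 1, u => if (pvSNat u : Int) ≤ target then u else 10 * pvMstop target f (pvCeilN u)

/-- little-endian value of a digit list -/
def pvLval (t : List Int) : Int := t.foldr (fun d a => a * 10 + d) 0

-- ---- character / string bridges ----

lemma pvToChars_nonneg (n : Int) (h : 0 ≤ n) :
    PySem.Int.toChars n = Nat.toDigits 10 n.toNat := by
  simp [PySem.Int.toChars, Int.not_lt.mpr h]

lemma pvToDigitsCore_eq (fuel n : Nat) (ds : List Char) (hf : n < fuel) (hn : 0 < n) :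
    Nat.toDigitsCore 10 fuel n ds = (Nat.digits 10 n).reverse.map Nat.digitChar ++ ds := by
  induction fuel generalizing n ds with
  | zero => omega
  | succ fuel ih =>
    rw [Nat.toDigitsCore]
    by_cases h0 : n / 10 = 0
    · have hd : Nat.digits 10 n = [n % 10] := by
        rw [Nat.digits_def' (by norm_num) hn, h0]; simp
      simp [h0, hd]
    · have hlt : n / 10 < fuel := by
        have := Nat.div_lt_self hn (by norm_num : 1 < 10)
        omega
      have hpos : 0 < n / 10 := Nat.pos_of_ne_zero h0
      simp only [h0, if_false]
      rw [ih (n / 10) _ hlt hpos]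
      rw [Nat.digits_def' (by norm_num) hn]
      simp

lemma pvToDigits_eq (n : Nat) (hn : 0 < n) :
    Nat.toDigits 10 n = (Nat.digits 10 n).reverse.map Nat.digitChar := by
  have := pvToDigitsCore_eq (n + 1) n [] (by omega) hn
  simpa [Nat.toDigits] using this

lemma pvIntOfChar_digitChar (d : Nat) (hd : d < 10) :
    pvIntOfChar (Nat.digitChar d) = (d : Int) := by
  interval_cases d <;> decide

lemma pvDigitsA_eq (n : Int) (h : 0 < n) :
    pvDigitsA n = (Nat.digits 10 n.toNat).reverse.map (fun d => Int.ofNat d) := by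
  have h0 : (0:Int) ≤ n := le_of_lt h
  unfold pvDigitsA
  rw [pvToChars_nonneg n h0, pvToDigits_eq n.toNat (by omega), List.map_map]
  apply List.map_congr_left
  intro d hd
  have hd10 : d < 10 := Nat.digits_lt_base (by norm_num) (List.mem_reverse.mp hd)
  simpa using pvIntOfChar_digitChar d hd10

lemma pvMapOfNat_sum (l : List Nat) : (l.map (fun d => Int.ofNat d)).sum = Int.ofNat l.sum := by
  induction l with
  | nil => simp
  | cons a l ih =>
    simp only [List.map_cons, List.sum_cons, ih, Int.ofNat_eq_natCast]
    push_cast; ring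

lemma pvDigitSum_eq (m : Int) (h : 0 ≤ m) : pvDigitSum m = (pvSNat m.toNat : Int) := by
  unfold pvDigitSum
  by_cases h0 : m = 0
  · subst h0; decide
  · have hpos : 0 < m.toNat := by omega
    rw [pvToChars_nonneg m h, pvToDigits_eq m.toNat hpos, List.map_map]
    have : ((Nat.digits 10 m.toNat).reverse.map (pvIntOfChar ∘ Nat.digitChar)).sum
        = ((Nat.digits 10 m.toNat).reverse.map (fun d => Int.ofNat d)).sum := by
      congr 1
      apply List.map_congr_left
      intro d hd
      have hd10 : d < 10 := Nat.digits_lt_base (by norm_num) (List.mem_reverse.mp hd)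
      simpa using pvIntOfChar_digitChar d hd10
    rw [this, pvMapOfNat_sum, List.sum_reverse]
    simp [pvSNat]

lemma pvToChars_digit (d : Int) (h0 : 0 ≤ d) (h9 : d < 10) :
    PySem.Int.toChars d = [Nat.digitChar d.toNat] := by
  interval_cases d <;> decide

-- ---- Nat.digits helper lemmas ----

lemma pvOfDigits_replicate_nine (t : Nat) :
    Nat.ofDigits 10 (List.replicate t 9) = 10 ^ t - 1 := by
  induction t with
  | zero => simp [Nat.ofDigits]
  | succ t ih =>
    rw [List.replicate_succ, Nat.ofDigits_cons, ih, pow_succ]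
    have : 1 ≤ 10 ^ t := Nat.one_le_pow _ _ (by norm_num)
    omega

lemma pvDigits_pow (m : Nat) :
    Nat.digits 10 (10 ^ m) = List.replicate m 0 ++ [1] := by
  have hof : Nat.ofDigits 10 (List.replicate m 0 ++ [1]) = 10 ^ m := by
    rw [Nat.ofDigits_append]
    have hz : Nat.ofDigits 10 (List.replicate m (0:Nat)) = 0 := by
      induction m with
      | zero => simp [Nat.ofDigits]
      | succ m ih => simp [List.replicate_succ, Nat.ofDigits_cons, ih]
    simp [hz, Nat.ofDigits, List.length_replicate]
  rw [← hof, Nat.digits_ofDigits 10 (by norm_num)]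
  · intro l hl
    rcases List.mem_append.mp hl with h | h
    · rw [List.eq_of_mem_replicate h]; norm_num
    · simp at h; omega
  · intro hne
    rw [List.getLast_eq_getElem]
    simp [List.getElem_append]

lemma pvSNat_pow (m : Nat) : pvSNat (10 ^ m) = 1 := by
  unfold pvSNat; rw [pvDigits_pow]; simp

lemma pvDigits_nines (m : Nat) :
    Nat.digits 10 (10 ^ m - 1) = List.replicate m 9 := by
  have hof := pvOfDigits_replicate_nine m
  rw [← hof, Nat.digits_ofDigits 10 (by norm_num)]
  · intro l hl; rw [List.eq_of_mem_replicate hl]; norm_num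
  · intro hne
    rw [List.getLast_eq_getElem]
    simp

lemma pvDigits_succ_nines (w t r : Nat) (R' : List Nat) (hr : r < 9)
    (hw : Nat.digits 10 w = List.replicate t 9 ++ r :: R') :
    Nat.digits 10 (w + 1) = List.replicate t 0 ++ (r + 1) :: R' := by
  have hwne : (List.replicate t 9 ++ r :: R') ≠ [] := by simp
  have hw0 : w ≠ 0 := by
    intro h0; rw [h0] at hw; exact hwne (by simpa using hw.symm)
  have hdig : ∀ l ∈ Nat.digits 10 w, l < 10 := fun l hl => Nat.digits_lt_base (by norm_num) hl
  have hR' : ∀ l ∈ R', l < 10 := by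
    intro l hl; apply hdig; rw [hw]; simp [hl]
  have hzero : Nat.ofDigits 10 (List.replicate t (0:Nat)) = 0 := by
    induction t with
    | zero => simp [Nat.ofDigits]
    | succ t ih => simp [List.replicate_succ, Nat.ofDigits_cons, ih]
  have hval : Nat.ofDigits 10 (List.replicate t 0 ++ (r + 1) :: R') = w + 1 := by
    have h1 : w = Nat.ofDigits 10 (List.replicate t 9 ++ r :: R') := by
      conv_lhs => rw [← Nat.ofDigits_digits 10 w, hw]
    rw [Nat.ofDigits_append, Nat.ofDigits_cons, pvOfDigits_replicate_nine] at h1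
    rw [Nat.ofDigits_append, Nat.ofDigits_cons, hzero]
    have hP : 1 ≤ 10 ^ t := Nat.one_le_pow _ _ (by norm_num)
    simp only [List.length_replicate] at h1 ⊢
    have hexp : 10 ^ t * (r + 1 + 10 * Nat.ofDigits 10 R')
        = 10 ^ t * (r + 10 * Nat.ofDigits 10 R') + 10 ^ t := by ring
    omega
  rw [← hval, Nat.digits_ofDigits 10 (by norm_num)]
  · intro l hl
    rcases List.mem_append.mp hl with hh | hh
    · rw [List.eq_of_mem_replicate hh]; norm_num
    · rcases List.mem_cons.mp hh with hh | hh
      · omega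
      · exact hR' l hh
  · intro hne
    rw [List.getLast_append_of_ne_nil hne (by simp)]
    cases R' with
    | nil => simp
    | cons a R'' =>
      rw [List.getLast_cons (by simp)]
      have hlast := Nat.getLast_digit_ne_zero 10 hw0
      simp only [hw] at hlast
      rwa [List.getLast_append_of_ne_nil (by simp) (by simp), List.getLast_cons (by simp)] at hlast

-- ---- the carry loop ----

lemma pvCarry_stop (ds : List Int) (i : Int)
    (h : ¬(0 < i ∧ PySem.List.pyGetD ds i 0 = 9)) : pvCarry ds i = (ds, i) := by
  rw [pvCarry]; simp [h]

lemma pvCarry_step (ds : List Int) (i : Int) (h1 : 0 < i)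
    (h2 : PySem.List.pyGetD ds i 0 = 9) :
    pvCarry ds i = pvCarry (PySem.List.pySetD ds i 0) (i - 1) := by
  rw [pvCarry]; simp [h1, h2]

lemma pvCarry_run (X : List Int) (t : Nat) (T : List Int) (hX : X ≠ [])
    (h9 : 2 ≤ X.length → X.getLast? ≠ some 9) :
    pvCarry (X ++ (List.replicate t 9 ++ T)) (((X.length + t : Nat) : Int) - 1)
      = (X ++ (List.replicate t 0 ++ T), ((X.length : Nat) : Int) - 1) := by
  induction t generalizing T with
  | zero =>
    simp only [List.replicate_zero, Nat.add_zero]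
    apply pvCarry_stop
    rintro ⟨hpos, hget⟩
    have hlen : 1 ≤ X.length := List.length_pos_iff.mpr hX
    have h2 : 2 ≤ X.length := by
      by_contra h
      have : X.length = 1 := by omega
      rw [this] at hpos; norm_num at hpos
    have hcast : ((X.length : Nat) : Int) - 1 = ((X.length - 1 : Nat) : Int) := by omega
    rw [hcast, PySem.List.pyGetD_natCast] at hget
    rw [List.getD_append _ _ _ _ (by omega)] at hget
    rw [List.getD_eq_getElem _ _ (by omega)] at hget
    have : X.getLast? = some 9 := by
      rw [List.getLast?_eq_some_getLast hX, List.getLast_eq_getElem]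
      exact congrArg some hget
    exact h9 h2 this
  | succ t ih =>
    have hlen : 1 ≤ X.length := List.length_pos_iff.mpr hX
    have hcast : ((X.length + (t+1) : Nat) : Int) - 1 = ((X.length + t : Nat) : Int) := by omega
    rw [hcast]
    have hget : PySem.List.pyGetD (X ++ (List.replicate (t+1) 9 ++ T)) ((X.length + t : Nat) : Int) 0 = 9 := by
      rw [PySem.List.pyGetD_natCast]
      rw [List.getD_append_right _ _ _ _ (by omega)]
      rw [List.getD_append _ _ _ _ (by simp only [List.length_replicate]; omega)]
      rw [List.getD_replicate _ (by omega)]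
    rw [pvCarry_step _ _ (by omega) hget]
    have hset : PySem.List.pySetD (X ++ (List.replicate (t+1) 9 ++ T)) ((X.length + t : Nat) : Int) 0
        = X ++ (List.replicate t 9 ++ (0 :: T)) := by
      rw [PySem.List.pySetD_natCast, List.set_append]
      simp only [if_neg (by omega : ¬ (X.length + t < X.length))]
      congr 1
      rw [List.set_append]
      simp only [List.length_replicate, if_pos (by omega : X.length + t - X.length < t + 1)]
      have : X.length + t - X.length = t := by omega
      rw [this]
      rw [List.replicate_succ' (n := t)]
      rw [List.set_append]
      simp [List.replicate_succ']
    rw [hset, ih (0 :: T)]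
    have : List.replicate t (0:Int) ++ (0 :: T) = List.replicate (t+1) 0 ++ T := by
      simp [List.replicate_succ']
    rw [this]

lemma pvSum_repD (u m z : Nat) (hu : 1 ≤ u) :
    (pvRepD u m ++ List.replicate z 0).sum = pvLsumA u m := by
  unfold pvRepD pvLsumA
  by_cases h : u = 10 ^ m
  · simp [h, List.sum_append, List.sum_replicate]
  · simp only [h, if_false, List.sum_append, List.sum_replicate, smul_zero, add_zero]
    rw [pvMapOfNat_sum, List.sum_reverse]
    simp [pvSNat]

lemma pvCeil_int (u : Nat) :
    -(PySem.Int.floordiv (-(u : Int)) 10) = (pvCeilN u : Int) := by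
  rw [PySem.Int.floordiv_eq_ediv_of_pos (by norm_num)]
  unfold pvCeilN
  by_cases h : u % 10 = 0 <;> simp [h] <;> omega

lemma pvLoopB_mul (target : Int) : ∀ (f : Nat) (u : Nat) (p : Int),
    (pvLoopB target f (u : Int) p).1 * (pvLoopB target f (u : Int) p).2
      = (pvMstop target f u : Int) * p := by
  intro f
  induction f with
  | zero => intro u p; simp [pvLoopB, pvMstop]
  | succ f ih =>
    intro u p
    rw [pvLoopB, pvMstop.eq_def]
    rw [pvDigitSum_eq _ (Int.natCast_nonneg u), Int.toNat_natCast]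
    by_cases h : (pvSNat u : Int) ≤ target
    · simp [h]
    · simp only [h, if_false]
      rw [pvCeil_int, ih]
      push_cast
      ring

lemma pvADig_lt (u : Nat) : pvADig u < 10 := by
  unfold pvADig; omega

lemma pvTailA_digits (target : Int) : ∀ (m u : Nat) (d : Int),
    d ∈ pvTailA target m u → 0 ≤ d ∧ d < 10 := by
  intro m
  induction m with
  | zero => intro u d hd; simp [pvTailA] at hd
  | succ m ih =>
    intro u d hd
    rw [pvTailA] at hd
    by_cases h : pvLsumA u (m + 1) ≤ target
    · simp [h] at hd
    · simp only [h, if_false, List.mem_cons] at hd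
      rcases hd with hd | hd
      · subst hd
        have := pvADig_lt u
        constructor <;> [positivity; exact_mod_cast this]
      · exact ih _ _ hd

lemma pvLval_cons (a : Int) (t : List Int) : pvLval (a :: t) = pvLval t * 10 + a := rfl

lemma pvTail_pow_zero (target : Int) : ∀ (m : Nat),
    pvLval (pvTailA target m (10 ^ m)) = 0 := by
  intro m
  induction m with
  | zero => simp [pvTailA, pvLval]
  | succ m ih =>
    rw [pvTailA]
    by_cases h : pvLsumA (10 ^ (m + 1)) (m + 1) ≤ target
    · simp [h, pvLval]
    · simp only [h, if_false]
      have h10 : 10 ^ (m + 1) = 10 ^ m * 10 := pow_succ 10 m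
      have hmod : 10 ^ (m + 1) % 10 = 0 := by omega
      have hdig : pvADig (10 ^ (m + 1)) = 0 := by unfold pvADig; omega
      have hceil : pvCeilN (10 ^ (m + 1)) = 10 ^ m := by unfold pvCeilN; simp [hmod]; omega
      rw [hdig, hceil, pvLval_cons, ih]
      simp

lemma pvSNat_one : pvSNat 1 = 1 := by decide

lemma pvCeilN_bounds (m u : Nat) (h1 : 10 ^ m ≤ u) (h2 : u ≤ 10 ^ (m + 1)) :
    10 ^ (m - 1) ≤ pvCeilN u ∧ pvCeilN u ≤ 10 ^ m := by
  unfold pvCeilN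
  cases m with
  | zero =>
    simp only [pow_zero] at *
    have : (10:Nat) ^ 1 = 10 := by norm_num
    rw [this] at h2
    constructor <;> [skip; skip] <;> split <;> omega
  | succ k =>
    have e1 : (10:Nat) ^ (k + 1) = 10 ^ k * 10 := pow_succ 10 k
    have e2 : (10:Nat) ^ (k + 2) = 10 ^ (k + 1) * 10 := pow_succ 10 (k+1)
    simp only [Nat.add_sub_cancel]
    constructor <;> split <;> omega

lemma pvADig_eq (u : Nat) : (pvADig u : Int) = 10 * (pvCeilN u : Int) - (u : Int) := by
  unfold pvADig pvCeilN
  by_cases h : u % 10 = 0 <;> simp [h] <;> push_cast <;> omega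

lemma pvTail_mstop (target : Int) (ht : 1 ≤ target) : ∀ (m u : Nat),
    10 ^ (m - 1) ≤ u → u ≤ 10 ^ m →
    pvLval (pvTailA target m u) = (pvMstop target (m + 1) u : Int) - (u : Int) := by
  intro m
  induction m with
  | zero =>
    intro u hl hh
    simp only [pow_zero] at hl hh
    have hu : u = 1 := by omega
    subst hu
    rw [pvTailA, pvMstop, pvSNat_one]
    simp [pvLval, if_pos ht, pvMstop]
  | succ m ih =>
    intro u hl hh
    rw [pvTailA]
    rw [show m + 1 + 1 = (m + 1) + 1 from rfl, pvMstop]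
    by_cases hu10 : u = 10 ^ (m + 1)
    · -- the top-carry anomaly: the list head is 10 although the digit sum is 1
      have hls : pvLsumA u (m + 1) = 10 := by unfold pvLsumA; simp [hu10]
      have hs1 : (pvSNat u : Int) = 1 := by rw [hu10, pvSNat_pow]; norm_num
      rw [hls, hs1]
      rw [if_pos ht]
      by_cases h10 : (10 : Int) ≤ target
      · simp [h10, pvLval]
      · simp only [h10, if_false]
        have h10' : (10:Nat) ^ (m + 1) % 10 = 0 := by
          have : (10:Nat) ^ (m + 1) = 10 ^ m * 10 := pow_succ 10 m
          omega
        have hdig : pvADig u = 0 := by unfold pvADig; omega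
        have hceil : pvCeilN u = 10 ^ m := by
          unfold pvCeilN
          rw [hu10]
          simp [h10']
          have : (10:Nat) ^ (m + 1) = 10 ^ m * 10 := pow_succ 10 m
          omega
        rw [hdig, hceil, pvLval_cons, pvTail_pow_zero]
        simp
    · have hls : pvLsumA u (m + 1) = (pvSNat u : Int) := by unfold pvLsumA; simp [hu10]
      rw [hls]
      by_cases hstop : (pvSNat u : Int) ≤ target
      · simp [hstop, pvLval]
      · simp only [hstop, if_false]
        have hub : u ≤ 10 ^ (m + 1) := hh
        have hlb : 10 ^ m ≤ u := by simpa using hl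
        obtain ⟨hb1, hb2⟩ := pvCeilN_bounds m u hlb hub
        have hih := ih (pvCeilN u) hb1 hb2
        rw [pvLval_cons, hih]
        have := pvADig_eq u
        push_cast
        linarith

lemma pvDigits_len (u m : Nat) (h1 : 10 ^ m ≤ u) (h2 : u < 10 ^ (m + 1)) :
    (Nat.digits 10 u).length = m + 1 := by
  have hle := (Nat.digits_length_le_iff (b := 10) (by norm_num) u).mpr h2
  have hlt := (Nat.lt_digits_length_iff (b := 10) (by norm_num) u).mpr h1
  omega

lemma pvGetD_mid (P : List Int) (x : Int) (Q : List Int) :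
    (P ++ x :: Q).getD P.length 0 = x := by
  rw [List.getD_append_right _ _ _ _ (le_refl _)]
  simp

lemma pvSet_mid (P : List Int) (x y : Int) (Q : List Int) :
    (P ++ x :: Q).set P.length y = P ++ y :: Q := by
  rw [List.set_append]
  simp

lemma pvGetD_zero (x : Int) (L : List Int) : PySem.List.pyGetD (x :: L) 0 0 = x := by
  have h : (0:Int) = ((0:Nat):Int) := rfl
  rw [h, PySem.List.pyGetD_natCast]
  rfl

lemma pvSetD_zero (x y : Int) (L : List Int) : PySem.List.pySetD (x :: L) 0 y = y :: L := by
  have h : (0:Int) = ((0:Nat):Int) := rfl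
  rw [h, PySem.List.pySetD_natCast]
  rfl

lemma pvLoopA_inv (target : Int) : ∀ (m u z : Nat) (ans : List Int),
    10 ^ (m - 1) ≤ u → u ≤ 10 ^ m →
    (pvLoopA target m (pvRepD u m ++ List.replicate z 0) ans).2 = ans ++ pvTailA target m u := by
  intro m
  induction m with
  | zero => intro u z ans _ _; simp [pvLoopA, pvTailA]
  | succ m ih =>
    intro u z ans hl hh
    simp only [Nat.add_sub_cancel] at hl
    have hu1 : 1 ≤ u := le_trans (Nat.one_le_pow _ _ (by norm_num)) hl
    rw [pvLoopA, pvSum_repD u (m+1) z hu1, pvTailA]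
    by_cases hstop : pvLsumA u (m + 1) ≤ target
    · simp [hstop]
    · simp only [hstop, if_false]
      by_cases hu10 : u = 10 ^ (m + 1)
      · -- top value 10^(m+1): the prefix list is 10 :: 0 … 0
        have hrep : pvRepD u (m + 1) = (10 : Int) :: List.replicate m 0 := by
          unfold pvRepD; simp [hu10]
        have hmod : u % 10 = 0 := by
          have e : (10:Nat) ^ (m + 1) = 10 ^ m * 10 := pow_succ 10 m
          omega
        have hceil : pvCeilN u = 10 ^ m := by
          have e : (10:Nat) ^ (m + 1) = 10 ^ m * 10 := pow_succ 10 m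
          unfold pvCeilN; simp [hmod]; omega
        have hdig : pvADig u = 0 := by unfold pvADig; omega
        rw [hrep, hdig, hceil]
        cases m with
        | zero =>
          -- u = 10, list is [10]: appending 0, the +1 carry is dropped
          have hget : PySem.List.pyGetD (((10:Int) :: List.replicate 0 0) ++ List.replicate z 0) ((0:Nat) : Int) 0 = 10 := by
            simp
          rw [hget]
          rw [pvCarry_stop _ _ (by rintro ⟨h1, -⟩; revert h1; decide)]
          norm_num
          simp [pvLoopA, pvTailA]
        | succ k =>
          have hget : PySem.List.pyGetD (((10:Int) :: List.replicate (k+1) 0) ++ List.replicate z 0) ((k+1 : Nat) : Int) 0 = 0 := by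
            rw [PySem.List.pyGetD_natCast]
            rw [List.cons_append, List.getD_cons_succ]
            rw [List.getD_append _ _ _ _ (by simp)]
            rw [List.getD_replicate _ (by omega)]
          rw [hget]
          have hset : PySem.List.pySetD (((10:Int) :: List.replicate (k+1) 0) ++ List.replicate z 0) ((k+1 : Nat) : Int) 0
              = ((10:Int) :: List.replicate k 0) ++ List.replicate (z+1) 0 := by
            rw [PySem.List.pySetD_natCast]
            rw [List.cons_append, List.set_cons_succ]
            rw [List.replicate_succ' (n := k), List.append_assoc, List.set_append]
            simp only [List.length_replicate, lt_irrefl, if_neg (lt_irrefl k), Nat.sub_self]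
            simp [List.replicate_succ]
          rw [if_neg (by norm_num)]
          rw [hset]
          have hrep' : ((10:Int) :: List.replicate k 0) = pvRepD (10 ^ (k + 1)) (k + 1) := by
            unfold pvRepD; simp
          rw [hrep']
          rw [ih (10 ^ (k+1)) (z+1) (ans ++ [(0:Int)])
            (by simpa using Nat.pow_le_pow_right (by norm_num) (by omega : k ≤ k + 1)) (le_refl _)]
          simp
      · -- u < 10^(m+1) : the prefix is the digit string of u
        have hult : u < 10 ^ (m + 1) := lt_of_le_of_ne hh hu10
        have hW : Nat.digits 10 u = u % 10 :: Nat.digits 10 (u / 10) :=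
          Nat.digits_def' (by norm_num) (by omega)
        have hulen : (Nat.digits 10 u).length = m + 1 := pvDigits_len u m hl hult
        have hwlen : (Nat.digits 10 (u / 10)).length = m := by
          rw [hW] at hulen; simpa using hulen
        have hds : pvRepD u (m+1) ++ List.replicate z 0
            = ((Nat.digits 10 (u / 10)).reverse.map (fun d => Int.ofNat d))
              ++ (Int.ofNat (u % 10) :: List.replicate z 0) := by
          unfold pvRepD
          rw [if_neg hu10, hW]
          simp [List.reverse_cons, List.map_append, List.append_assoc]
        have hPlen : ((Nat.digits 10 (u / 10)).reverse.map (fun d => Int.ofNat d)).length = m := by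
          simp [hwlen]
        have hget : PySem.List.pyGetD (pvRepD u (m+1) ++ List.replicate z 0) ((m : Nat) : Int) 0
            = Int.ofNat (u % 10) := by
          rw [PySem.List.pyGetD_natCast, hds, ← hPlen, pvGetD_mid]
        rw [hget]
        by_cases hd0 : u % 10 = 0
        · -- last digit 0: no carry, just drop the digit
          have hm1 : 1 ≤ m := by
            rcases Nat.eq_zero_or_pos m with h0 | h; · exfalso; rw [h0] at hl hult; omega
            exact h
          have e : (10:Nat) ^ (m + 1) = 10 ^ m * 10 := pow_succ 10 m
          have hwne : u / 10 ≠ 10 ^ m := by omega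
          have hset : PySem.List.pySetD (pvRepD u (m+1) ++ List.replicate z 0) ((m : Nat) : Int) 0
              = ((Nat.digits 10 (u / 10)).reverse.map (fun d => Int.ofNat d)) ++ List.replicate (z+1) 0 := by
            rw [PySem.List.pySetD_natCast, hds, ← hPlen, pvSet_mid]
            simp [List.replicate_succ]
          rw [if_neg (by simp [Int.ofNat_eq_natCast, hd0])]
          rw [hset]
          have hrep' : (Nat.digits 10 (u / 10)).reverse.map (fun d => Int.ofNat d)
              = pvRepD (u / 10) m := by
            unfold pvRepD; rw [if_neg hwne]
          rw [hrep']
          have hceil : pvCeilN u = u / 10 := by unfold pvCeilN; simp [hd0]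
          have hdig : pvADig u = 0 := by unfold pvADig; omega
          have e2 : (10:Nat) ^ m = 10 ^ (m - 1) * 10 := by
            rcases Nat.exists_eq_succ_of_ne_zero (by omega : m ≠ 0) with ⟨k, rfl⟩
            simpa using pow_succ 10 k
          rw [ih (u / 10) (z+1) (ans ++ [(0:Int)]) (by omega) (by omega)]
          rw [hceil, hdig]
          simp
        · -- last digit ≠ 0 : carry
          have hDne : Int.ofNat (u % 10) ≠ 0 := by
            simp [Int.ofNat_eq_natCast]; omega
          simp only [hDne, ne_eq, not_false_eq_true, if_true]
          have hans : (10 : Int) - Int.ofNat (u % 10) = Int.ofNat (pvADig u) := by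
            unfold pvADig
            simp only [Int.ofNat_eq_natCast]
            push_cast
            omega
          rw [hans]
          cases m with
          | zero =>
            have hw0 : u / 10 = 0 := by omega
            have hds0 : pvRepD u (0+1) ++ List.replicate z 0
                = Int.ofNat (u % 10) :: List.replicate z 0 := by
              rw [hds, hw0]; simp
            rw [hds0]
            rw [pvCarry_stop _ _ (by rintro ⟨h1, -⟩; revert h1; decide)]
            rw [if_neg (show ¬ (0:Int) ≤ ((0:Nat):Int) - 1 by decide)]
            have hset0 : PySem.List.pySetD (Int.ofNat (u % 10) :: List.replicate z 0) ((0:Nat) : Int) 0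
                = (0:Int) :: List.replicate z 0 := by
              rw [PySem.List.pySetD_natCast]; rfl
            rw [hset0]
            simp [pvLoopA, pvTailA]
          | succ k =>
            have e3 : (10:Nat) ^ (k + 2) = 10 ^ (k+1) * 10 := pow_succ 10 (k+1)
            have e4 : (10:Nat) ^ (k + 1) = 10 ^ k * 10 := pow_succ 10 k
            have hwb1 : 10 ^ k ≤ u / 10 := by omega
            have hwb2 : u / 10 ≤ 10 ^ (k+1) - 1 := by omega
            have htk : (Nat.digits 10 (u / 10)).takeWhile (fun d => d == 9)
                = List.replicate ((Nat.digits 10 (u / 10)).takeWhile (fun d => d == 9)).length 9 :=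
              List.eq_replicate_iff.mpr ⟨rfl, fun b hb => by simpa using List.mem_takeWhile_imp hb⟩
            have hsplit := (List.takeWhile_append_dropWhile (p := fun d => d == 9) (l := Nat.digits 10 (u / 10))).symm
            rw [htk] at hsplit
            rcases hR : (Nat.digits 10 (u / 10)).dropWhile (fun d => d == 9) with _ | ⟨r, R'⟩
            · -- all digits of u/10 are 9 : the carry ripples to the top
              rw [hR] at hsplit
              have ht9 : ((Nat.digits 10 (u / 10)).takeWhile (fun d => d == 9)).length = k + 1 := by
                have := congrArg List.length hsplit
                simp only [List.append_nil, List.length_replicate] at this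
                omega
              rw [ht9] at hsplit
              have hwval : u / 10 = 10 ^ (k + 1) - 1 := by
                have h1 : u / 10 = Nat.ofDigits 10 (Nat.digits 10 (u / 10)) := (Nat.ofDigits_digits 10 (u / 10)).symm
                rw [hsplit, List.append_nil, pvOfDigits_replicate_nine] at h1
                exact h1
              have hds2 : pvRepD u (k+1+1) ++ List.replicate z 0
                  = [(9:Int)] ++ (List.replicate k 9 ++ (Int.ofNat (u % 10) :: List.replicate z 0)) := by
                rw [hds, hsplit]
                simp only [List.append_nil]
                rw [List.reverse_replicate, List.map_replicate, List.replicate_succ]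
                simp
              rw [hds2]
              have hidxg : ((k + 1 : Nat) : Int) - 1 = (([(9:Int)].length + k : Nat) : Int) - 1 := by
                norm_num
              rw [hidxg]
              have hcr := pvCarry_run [(9:Int)] k (Int.ofNat (u % 10) :: List.replicate z 0)
                (by simp) (by intro h; simp at h)
              rw [hcr]
              simp only [List.length_cons, List.length_nil, Nat.zero_add, Nat.cast_one, List.singleton_append]
              rw [show (1:Int) - 1 = 0 from by norm_num]
              rw [if_pos (le_refl (0:Int))]
              rw [pvGetD_zero, pvSetD_zero]
              rw [show (9:Int) + 1 = 10 from by norm_num]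
              have hsetk : PySem.List.pySetD ((10:Int) :: (List.replicate k 0 ++ (Int.ofNat (u % 10) :: List.replicate z 0))) ((k+1 : Nat) : Int) 0
                  = ((10:Int) :: List.replicate k 0) ++ List.replicate (z+1) 0 := by
                rw [PySem.List.pySetD_natCast, List.set_cons_succ, List.set_append]
                rw [if_neg (by simp)]
                simp [List.replicate_succ]
              rw [hsetk]
              have hrep2 : (10:Int) :: List.replicate k 0 = pvRepD (10 ^ (k+1)) (k+1) := by
                unfold pvRepD; simp
              rw [hrep2]
              rw [ih (10 ^ (k+1)) (z+1) (ans ++ [Int.ofNat (pvADig u)])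
                (by simpa using Nat.pow_le_pow_right (by norm_num : 1 ≤ 10) (by omega : k ≤ k + 1)) (le_refl _)]
              have hceil : pvCeilN u = 10 ^ (k+1) := by
                unfold pvCeilN
                rw [if_neg hd0]
                omega
              rw [hceil]
              simp
            · -- lowest non-9 digit r of u/10 absorbs the carry
              rw [hR] at hsplit
              obtain ⟨t9, hsplit⟩ : ∃ t9, Nat.digits 10 (u / 10) = List.replicate t9 9 ++ r :: R' :=
                ⟨_, hsplit⟩
              have hr9 : r ≠ 9 := by
                intro hc
                have hw := List.head_dropWhile_not (fun d => (d == 9)) (l := Nat.digits 10 (u / 10)) (by rw [hR]; simp)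
                simp [hR, hc] at hw
              have hr10 : r < 10 := by
                refine Nat.digits_lt_base (by norm_num) (show r ∈ Nat.digits 10 (u / 10) from ?_)
                rw [hsplit]; simp
              have hdw : Nat.digits 10 (u / 10 + 1)
                  = List.replicate t9 0
                    ++ (r + 1) :: R' :=
                pvDigits_succ_nines (u / 10) _ r R' (by omega) hsplit
              have hlenw : t9 + (R'.length + 1) = k + 1 := by
                have := congrArg List.length hsplit
                simp only [List.length_append, List.length_replicate, List.length_cons] at this
                omega
              have hds2 : pvRepD u (k+1+1) ++ List.replicate z 0
                  = (R'.reverse.map (fun d => Int.ofNat d) ++ [Int.ofNat r])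
                    ++ (List.replicate t9 9
                        ++ (Int.ofNat (u % 10) :: List.replicate z 0)) := by
                rw [hds, hsplit]
                simp only [List.reverse_append, List.reverse_cons, List.reverse_replicate,
                  List.map_append, List.map_replicate, List.map_cons, List.map_nil, List.append_assoc]
                simp
              rw [hds2]
              have hXlen : (R'.reverse.map (fun d => Int.ofNat d) ++ [Int.ofNat r]).length = R'.length + 1 := by
                simp
              have hcr := pvCarry_run (R'.reverse.map (fun d => Int.ofNat d) ++ [Int.ofNat r])
                t9
                (Int.ofNat (u % 10) :: List.replicate z 0)
                (by simp)
                (by intro _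
                    rw [List.getLast?_concat]
                    intro hcon
                    simp only [Option.some_inj, Int.ofNat_eq_natCast] at hcon
                    omega)
              rw [hXlen] at hcr
              rw [show R'.length + 1 + t9 = k + 1 by omega] at hcr
              rw [hcr]
              rw [if_pos (by push_cast; omega : (0:Int) ≤ ((R'.length + 1 : Nat) : Int) - 1)]
              have hcast1 : ((R'.length + 1 : Nat) : Int) - 1 = ((R'.length : Nat) : Int) := by push_cast; ring
              rw [hcast1]
              have hmidget : PySem.List.pyGetD ((R'.reverse.map (fun d => Int.ofNat d) ++ [Int.ofNat r])
                  ++ (List.replicate t9 0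
                      ++ (Int.ofNat (u % 10) :: List.replicate z 0))) ((R'.length : Nat) : Int) 0 = Int.ofNat r := by
                rw [PySem.List.pyGetD_natCast]
                rw [List.append_assoc]
                rw [show (R'.length : Nat) = (R'.reverse.map (fun d => Int.ofNat d)).length by simp]
                rw [List.singleton_append, pvGetD_mid]
              rw [hmidget]
              have hmidset : PySem.List.pySetD ((R'.reverse.map (fun d => Int.ofNat d) ++ [Int.ofNat r])
                  ++ (List.replicate t9 0
                      ++ (Int.ofNat (u % 10) :: List.replicate z 0))) ((R'.length : Nat) : Int) (Int.ofNat r + 1)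
                  = (R'.reverse.map (fun d => Int.ofNat d) ++ [Int.ofNat r + 1])
                    ++ (List.replicate t9 0
                        ++ (Int.ofNat (u % 10) :: List.replicate z 0)) := by
                rw [PySem.List.pySetD_natCast]
                rw [List.append_assoc]
                rw [show (R'.length : Nat) = (R'.reverse.map (fun d => Int.ofNat d)).length by simp]
                rw [List.singleton_append, pvSet_mid]
                simp [List.append_assoc]
              rw [hmidset]
              have hsetk : PySem.List.pySetD ((R'.reverse.map (fun d => Int.ofNat d) ++ [Int.ofNat r + 1])
                  ++ (List.replicate t9 0
                      ++ (Int.ofNat (u % 10) :: List.replicate z 0))) ((k+1 : Nat) : Int) 0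
                  = ((R'.reverse.map (fun d => Int.ofNat d) ++ [Int.ofNat r + 1])
                      ++ List.replicate t9 0)
                    ++ List.replicate (z+1) 0 := by
                rw [PySem.List.pySetD_natCast]
                rw [show ((R'.reverse.map (fun d => Int.ofNat d) ++ [Int.ofNat r + 1])
                    ++ (List.replicate t9 0
                        ++ (Int.ofNat (u % 10) :: List.replicate z 0)))
                  = ((R'.reverse.map (fun d => Int.ofNat d) ++ [Int.ofNat r + 1])
                      ++ List.replicate t9 0)
                    ++ (Int.ofNat (u % 10) :: List.replicate z 0) by simp [List.append_assoc]]
                rw [show (k + 1 : Nat) = ((R'.reverse.map (fun d => Int.ofNat d) ++ [Int.ofNat r + 1])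
                      ++ List.replicate t9 0).length by
                  simp; omega]
                rw [pvSet_mid]
                simp [List.replicate_succ]
              rw [hsetk]
              have hwne2 : u / 10 + 1 ≠ 10 ^ (k+1) := by
                intro hcon
                have hwv : u / 10 = 10 ^ (k+1) - 1 := by omega
                have : Nat.digits 10 (u / 10) = List.replicate (k+1) 9 := by
                  rw [hwv]; exact pvDigits_nines (k+1)
                have hrmem : r ∈ Nat.digits 10 (u / 10) := by rw [hsplit]; simp
                rw [this] at hrmem
                exact hr9 (List.eq_of_mem_replicate hrmem)
              have hrep2 : (R'.reverse.map (fun d => Int.ofNat d) ++ [Int.ofNat r + 1])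
                  ++ List.replicate t9 0
                  = pvRepD (u / 10 + 1) (k+1) := by
                unfold pvRepD
                rw [if_neg hwne2, hdw]
                simp [List.reverse_append, List.map_append, List.map_replicate, List.append_assoc]
              rw [hrep2]
              rw [ih (u / 10 + 1) (z+1) (ans ++ [Int.ofNat (pvADig u)]) (by simp; omega) (by omega)]
              have hceil : pvCeilN u = u / 10 + 1 := by
                unfold pvCeilN; rw [if_neg hd0]
              rw [hceil]
              simp

lemma pvFold_digits (t : List Int) (h : ∀ d ∈ t, 0 ≤ d ∧ d < 10) :
    t.foldr (fun d a => a * 10 + pvIntOfChar (Nat.digitChar d.toNat)) 0 = pvLval t := by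
  induction t with
  | nil => rfl
  | cons a t iht =>
    have ha := h a (by simp)
    have hchar : pvIntOfChar (Nat.digitChar a.toNat) = (a.toNat : Int) :=
      pvIntOfChar_digitChar a.toNat (by omega)
    rw [List.foldr_cons, iht (fun d hd => h d (by simp [hd])), pvLval_cons, hchar,
      Int.toNat_of_nonneg ha.1]

lemma pvFinalize (t : List Int) (h : ∀ d ∈ t, 0 ≤ d ∧ d < 10) :
    pvIntOfDigits (PySem.Chars.join [] ((t.map PySem.Int.toChars).reverse)) = pvLval t := by
  have hmap : t.map PySem.Int.toChars = t.map (fun d => [Nat.digitChar d.toNat]) :=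
    List.map_congr_left (fun d hd => pvToChars_digit d (h d hd).1 (h d hd).2)
  rw [hmap, ← List.map_reverse]
  rw [show (t.reverse.map (fun d => [Nat.digitChar d.toNat]))
      = ((t.reverse.map (fun d => Nat.digitChar d.toNat)).map (fun c => [c])) by
    rw [List.map_map]; rfl]
  rw [PySem.Chars.join_nil_singletons]
  unfold pvIntOfDigits
  rw [List.foldl_map, List.foldl_reverse]
  exact pvFold_digits t h

-- ===== VERDICT (by name: the statement is the Claim_ definition above) =====
theorem makeIntegerBeautiful_spec : Claim_equal_makeIntegerBeautiful := by
  intro n target _ hpre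
  obtain ⟨hn, ht⟩ := hpre
  unfold Spec_makeIntegerBeautiful
  by_cases h0 : n = 0
  · subst h0
    have hA : makeIntegerBeautiful 0 target = 0 := by
      unfold makeIntegerBeautiful
      show (if (pvLoopA target (pvDigitsA 0).length (pvDigitsA 0) []).2.length = 0 then 0
          else pvIntOfDigits (PySem.Chars.join []
            (((pvLoopA target (pvDigitsA 0).length (pvDigitsA 0) []).2.map PySem.Int.toChars).reverse))) = 0
      rw [show pvDigitsA 0 = [(0:Int)] from by decide]
      rw [show ([(0:Int)]).length = 0 + 1 from rfl]
      rw [pvLoopA, if_pos (show ([(0:Int)]).sum ≤ target by simp; omega)]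
      rfl
    have hB : makeIntegerBeautiful_alt 0 target = 0 := by
      unfold makeIntegerBeautiful_alt
      show (pvLoopB target ((PySem.Int.toChars 0).length + 1) 0 1).1
          * (pvLoopB target ((PySem.Int.toChars 0).length + 1) 0 1).2 - 0 = 0
      rw [show (PySem.Int.toChars 0).length = 1 from by decide]
      rw [pvLoopB, if_pos (by rw [show pvDigitSum 0 = 0 from by decide]; omega)]
      simp
    rw [hA, hB]
  · have hnpos : 0 < n := lt_of_le_of_ne hn (Ne.symm h0)
    have hNn : ((n.toNat : Nat) : Int) = n := Int.toNat_of_nonneg hn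
    have hNpos : 0 < n.toNat := by omega
    have hLne : Nat.digits 10 n.toNat ≠ [] := Nat.digits_ne_nil_iff_ne_zero.mpr (by omega)
    have hL1 : 1 ≤ (Nat.digits 10 n.toNat).length := List.length_pos_iff.mpr hLne
    have hub : n.toNat < 10 ^ (Nat.digits 10 n.toNat).length :=
      (Nat.digits_length_le_iff (by norm_num) n.toNat).mp (le_refl _)
    have hlb : 10 ^ ((Nat.digits 10 n.toNat).length - 1) ≤ n.toNat :=
      (Nat.lt_digits_length_iff (by norm_num) n.toNat).mp (by omega)
    have hdig : pvDigitsA n = pvRepD n.toNat (Nat.digits 10 n.toNat).length := by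
      rw [pvDigitsA_eq n hnpos]
      unfold pvRepD
      rw [if_neg (by omega)]
    have hlen : (pvDigitsA n).length = (Nat.digits 10 n.toNat).length := by
      rw [pvDigitsA_eq n hnpos]; simp
    have hloop := pvLoopA_inv target (Nat.digits 10 n.toNat).length n.toNat 0 [] hlb (le_of_lt hub)
    simp only [List.replicate_zero, List.append_nil, List.nil_append] at hloop
    have hA : makeIntegerBeautiful n target
        = pvLval (pvTailA target (Nat.digits 10 n.toNat).length n.toNat) := by
      unfold makeIntegerBeautiful
      show (if (pvLoopA target (pvDigitsA n).length (pvDigitsA n) []).2.length = 0 then 0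
          else pvIntOfDigits (PySem.Chars.join []
            (((pvLoopA target (pvDigitsA n).length (pvDigitsA n) []).2.map PySem.Int.toChars).reverse)))
          = pvLval (pvTailA target (Nat.digits 10 n.toNat).length n.toNat)
      rw [hlen, hdig, hloop]
      by_cases htl : pvTailA target (Nat.digits 10 n.toNat).length n.toNat = []
      · rw [htl]; rfl
      · rw [if_neg (by simpa using htl)]
        exact pvFinalize _ (fun d hd => pvTailA_digits target _ _ d hd)
    have hlenstr : (PySem.Int.toChars n).length = (Nat.digits 10 n.toNat).length := by
      rw [pvToChars_nonneg n hn, pvToDigits_eq n.toNat (by omega)]; simp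
    have hB : makeIntegerBeautiful_alt n target
        = (pvMstop target ((Nat.digits 10 n.toNat).length + 1) n.toNat : Int) - n := by
      unfold makeIntegerBeautiful_alt
      show (pvLoopB target ((PySem.Int.toChars n).length + 1) n 1).1
          * (pvLoopB target ((PySem.Int.toChars n).length + 1) n 1).2 - n
          = (pvMstop target ((Nat.digits 10 n.toNat).length + 1) n.toNat : Int) - n
      rw [hlenstr]
      have hmul := pvLoopB_mul target ((Nat.digits 10 n.toNat).length + 1) n.toNat 1
      rw [hNn] at hmul
      rw [hmul, mul_one]
    rw [hA, hB, pvTail_mstop target ht _ n.toNat hlb (le_of_lt hub), hNn]
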